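-- pv_equiv track=rewrite | github.com/jcolinpatrick/kryptos | scripts/statistical/e_freq_equiv_01.py | count_frequency_ties
-- ===== SOURCE A (Python) =====
-- import string
-- from collections import Counter
--
-- def count_frequency_ties(text):
--     """Count frequency equivalence classes (ties of 2+) in text.
--
--     Returns:
--         n_classes: number of equivalence classes with 2+ members
--         max_width: size of largest class
--         n_tied_letters: total letters involved in ties
--         tied_letters_by_freq: dict of freq -> set of letters
--     """
--     text = ''.join(c for c in text.upper() if c.isalpha())
--     freq = Counter(text)
--
--     # Group letters by frequency
--     freq_groups = {}
--     for ch, f in freq.items():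
--         if f not in freq_groups:
--             freq_groups[f] = set()
--         freq_groups[f].add(ch)
--
--     # Also count letters NOT in text (freq=0) as a group
--     all_letters = set(string.ascii_uppercase)
--     missing = all_letters - set(freq.keys())
--     if len(missing) >= 2:
--         freq_groups[0] = missing
--
--     # Filter to groups with 2+ members (exclude freq=0 for cleaner analysis)
--     tied = {f: letters for f, letters in freq_groups.items() if len(letters) >= 2 and f > 0}
--
--     n_classes = len(tied)
--     max_width = max((len(letters) for letters in tied.values()), default=0)
--     n_tied_letters = sum(len(letters) for letters in tied.values())
--
--     return n_classes, max_width, n_tied_letters, tied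
-- ===== SOURCE B (Python) =====
-- from collections import Counter
--
-- def count_frequency_ties(text):
--     """Count frequency equivalence classes (ties of 2+) in text."""
--     freq = Counter(c for c in text.upper() if c.isalpha())
--     vals = list(freq.values())
--     tied = {}
--     for f in dict.fromkeys(vals):      # distinct frequencies, first-occurrence order
--         if vals.count(f) >= 2:         # tied iff the frequency occurs for 2+ letters
--             tied[f] = {ch for ch, c in freq.items() if c == f}
--     sizes = [len(s) for s in tied.values()]
--     return len(tied), max(sizes, default=0), sum(sizes), tied
-- ===== Notes on version B (the rewrite author's own statement) =====
-- stated objective: alternative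
-- what changed: A makes one pass over the letters, incrementally growing a dict of frequency-groups (plus a dead missing-letters block) and filtering it afterwards; B never builds groups incrementally: it enumerates the distinct frequency values and, for each frequency whose multiplicity is 2+, gathers its letter class by a fresh scan of the counts (nested scans instead of dict grouping).
import Mathlib
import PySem

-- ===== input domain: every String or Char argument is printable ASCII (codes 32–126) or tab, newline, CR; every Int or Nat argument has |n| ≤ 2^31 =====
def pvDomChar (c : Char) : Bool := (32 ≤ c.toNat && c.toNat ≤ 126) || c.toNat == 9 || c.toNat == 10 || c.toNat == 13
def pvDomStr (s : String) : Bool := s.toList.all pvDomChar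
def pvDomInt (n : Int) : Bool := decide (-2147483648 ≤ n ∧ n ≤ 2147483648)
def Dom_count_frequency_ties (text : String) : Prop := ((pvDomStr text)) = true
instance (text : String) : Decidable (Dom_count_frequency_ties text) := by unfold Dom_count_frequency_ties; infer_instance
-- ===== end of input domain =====

-- A grows a dict of frequency-groups in one pass over the letters (plus a dead missing-letters
-- block) and filters it afterwards; B instead enumerates the distinct frequency values and gathers
-- each tied class by a fresh scan of the counts (objective: alternative decomposition).

-- ===== PORT A =====
def count_frequency_ties (text : String) : Int × Int × Int × (List (Int × List String)) :=
  -- text = ''.join(c for c in text.upper() if c.isalpha()); each character is a 1-char Python str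
  let cs : List String :=
    ((PySem.Str.upper text).toList.filter (fun c => PySem.Chars.isalpha c)).map (fun c => String.ofList [c])
  let freq : PySem.Dict String Int := PySem.Dict.counter cs
  -- for ch, f in freq.items(): if f not in freq_groups: freq_groups[f] = set(); freq_groups[f].add(ch)
  let freq_groups : PySem.Dict Int (PySem.Set String) :=
    freq.items.foldl
      (fun g p =>
        (if g.contains p.2 then g else g.insert p.2 PySem.Set.empty).modify p.2
          PySem.Set.empty (fun s => PySem.Set.add s p.1))
      PySem.Dict.empty
  let all_letters : PySem.Set String :=
    PySem.Set.ofList ("ABCDEFGHIJKLMNOPQRSTUVWXYZ".toList.map (fun c => String.ofList [c]))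
  let missing : PySem.Set String := PySem.Set.diff all_letters (PySem.Set.ofList freq.keys)
  let freq_groups2 : PySem.Dict Int (PySem.Set String) :=
    if 2 ≤ PySem.Set.len missing then freq_groups.insert 0 missing else freq_groups
  -- tied = {f: letters for f, letters in freq_groups.items() if len(letters) >= 2 and f > 0}
  let tied : PySem.Dict Int (PySem.Set String) :=
    PySem.Dict.mk (freq_groups2.items.filter
      (fun p => decide (2 ≤ PySem.Set.len p.2) && decide ((0:Int) < p.1)))
  ((tied.size : Int),
   PySem.List.maxD (tied.values.map PySem.Set.len) (fun x => x) 0,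
   (tied.values.map PySem.Set.len).sum,
   tied.items)

-- ===== PORT B =====
def count_frequency_ties_alt (text : String) : Int × Int × Int × (List (Int × List String)) :=
  let freq : PySem.Dict String Int :=
    PySem.Dict.counter
      (((PySem.Str.upper text).toList.filter (fun c => PySem.Chars.isalpha c)).map (fun c => String.ofList [c]))
  -- vals = list(freq.values())
  let vals : List Int := freq.values
  -- for f in dict.fromkeys(vals): if vals.count(f) >= 2: tied[f] = {ch for ch, c in freq.items() if c == f}
  let tied : PySem.Dict Int (PySem.Set String) :=
    (PySem.List.dedup vals).foldl
      (fun t f =>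
        if 2 ≤ PySem.List.count vals f then
          t.insert f (PySem.Set.ofList ((freq.items.filter (fun q => q.2 == f)).map Prod.fst))
        else t)
      PySem.Dict.empty
  let sizes : List Int := tied.values.map PySem.Set.len
  ((tied.size : Int), PySem.List.maxD sizes (fun x => x) 0, sizes.sum, tied.items)

-- ===== PRECONDITION & SPEC =====
def Spec_count_frequency_ties (text : String) (out : Int × Int × Int × (List (Int × List String))) : Prop := out = count_frequency_ties_alt text
instance (text : String) (out : Int × Int × Int × (List (Int × List String))) : Decidable (Spec_count_frequency_ties text out) := by unfold Spec_count_frequency_ties; infer_instance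

-- ===== CLAIM (what is proved, stated in full; the proofs are below) =====
def Claim_equal_count_frequency_ties : Prop := ∀ (text : String), Dom_count_frequency_ties text → Spec_count_frequency_ties text (count_frequency_ties text)

-- ===== LEMMAS AND PROOFS =====

/-- A's loop body: ensure a (possibly fresh) group for frequency `p.2`, add `p.1` to it. -/
def pvStep (g : PySem.Dict Int (PySem.Set String)) (p : String × Int) : PySem.Dict Int (PySem.Set String) :=
  (if g.contains p.2 then g else g.insert p.2 PySem.Set.empty).modify p.2
    PySem.Set.empty (fun s => PySem.Set.add s p.1)

/-- Grouping of the pairs of `L` by their second component, keeping only frequencies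
    satisfying `pred`, in first-occurrence order. -/
def pvGrp (pred : Int → Bool) (L : List (String × Int)) : List (Int × List String) :=
  ((PySem.List.dedup (L.map Prod.snd)).filter pred).map
    (fun f => (f, (L.filter (fun q => q.2 == f)).map Prod.fst))

lemma pv_dedup_append (xs : List Int) (x : Int) :
    PySem.List.dedup (xs ++ [x]) = if x ∈ xs then PySem.List.dedup xs else PySem.List.dedup xs ++ [x] := by
  simp only [PySem.List.dedup_eq_ofList, PySem.Set.ofList_eq_foldl, List.foldl_append,
    List.foldl_cons, List.foldl_nil]
  rw [← PySem.Set.ofList_eq_foldl]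
  simp only [PySem.Set.add, PySem.Set.contains, List.contains_eq_mem, PySem.Set.mem_ofList,
    decide_eq_true_eq]

lemma pv_add_fresh (s : List String) (x : String) (h : x ∉ s) :
    PySem.Set.add s x = s ++ [x] := by
  simp [PySem.Set.add, PySem.Set.contains, List.contains_eq_mem, h]

lemma pv_grp_keys (pred : Int → Bool) (L : List (String × Int)) :
    (pvGrp pred L).map Prod.fst = (PySem.List.dedup (L.map Prod.snd)).filter pred := by
  simp [pvGrp, List.map_map, Function.comp_def]

lemma pvStep_grp (pred : Int → Bool) (P : List (String × Int)) (e : String × Int)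
    (hch : e.1 ∉ P.map Prod.fst) :
    (if pred e.2 then pvStep (PySem.Dict.mk (pvGrp pred P)) e else PySem.Dict.mk (pvGrp pred P))
      = PySem.Dict.mk (pvGrp pred (P ++ [e])) := by
  have hsnd : (P ++ [e]).map Prod.snd = P.map Prod.snd ++ [e.2] := by simp
  have hgpt : ∀ f' : Int, f' ≠ e.2 →
      ((P ++ [e]).filter (fun q => q.2 == f')).map Prod.fst
        = (P.filter (fun q => q.2 == f')).map Prod.fst := by
    intro f' hne
    have : (e.2 == f') = false := beq_eq_false_iff_ne.mpr (fun h => hne h.symm)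
    simp [List.filter_append, this]
  by_cases hp : pred e.2
  · -- the group for e.2 is kept
    rw [if_pos hp]
    by_cases hmem : e.2 ∈ P.map Prod.snd
    · -- frequency already has a group: it is extended
      have hcont : (PySem.Dict.mk (pvGrp pred P)).contains e.2 = true := by
        rw [PySem.Dict.contains_eq_decide_mem_keys]
        have : (PySem.Dict.mk (pvGrp pred P)).keys = (PySem.List.dedup (P.map Prod.snd)).filter pred :=
          pv_grp_keys pred P
        rw [this]
        simp [List.mem_filter, hmem, hp]
      have hnk : (PySem.Dict.mk (pvGrp pred P)).keys.Nodup := by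
        rw [show (PySem.Dict.mk (pvGrp pred P)).keys = (pvGrp pred P).map Prod.fst from rfl,
          pv_grp_keys]
        exact (PySem.List.nodup_dedup _).filter _
      have hmemit : (e.2, (P.filter (fun q => q.2 == e.2)).map Prod.fst) ∈ pvGrp pred P := by
        unfold pvGrp
        exact List.mem_map.mpr ⟨e.2, by simp [List.mem_filter, hmem, hp], rfl⟩
      have hgetD : (PySem.Dict.mk (pvGrp pred P)).getD e.2 PySem.Set.empty
          = (P.filter (fun q => q.2 == e.2)).map Prod.fst :=
        PySem.Dict.getD_of_mem_items _ hmemit hnk _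
      unfold pvStep
      rw [if_pos hcont]
      rw [show ∀ (d : PySem.Dict Int (PySem.Set String)),
            d.modify e.2 PySem.Set.empty (fun s => PySem.Set.add s e.1)
              = d.insert e.2 (PySem.Set.add (d.getD e.2 PySem.Set.empty) e.1) from fun _ => rfl]
      apply PySem.Dict.ext
      rw [PySem.Dict.items_insert_of_contains _ _ hcont, hgetD]
      show (pvGrp pred P).map _ = _
      unfold pvGrp
      rw [hsnd, pv_dedup_append, if_pos hmem, List.map_map]
      apply List.map_congr_left
      intro f' hf'
      by_cases hfe : f' = e.2
      · subst hfe
        have hfresh : e.1 ∉ (P.filter (fun q => q.2 == e.2)).map Prod.fst := by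
          intro hin
          obtain ⟨q, hq, hqe⟩ := List.mem_map.mp hin
          exact hch (hqe ▸ List.mem_map_of_mem (List.mem_of_mem_filter hq))
        have hbeq : (e.2 == e.2) = true := by simp
        have h1 : ((P ++ [e]).filter (fun q => q.2 == e.2)) = P.filter (fun q => q.2 == e.2) ++ [e] := by
          rw [List.filter_append]; simp
        simp only [Function.comp_apply, hbeq, if_true, h1, List.map_append]
        rw [pv_add_fresh _ _ hfresh]
        simp
      · have hbeq : (f' == e.2) = false := beq_eq_false_iff_ne.mpr hfe
        simp only [Function.comp_apply, hbeq, Bool.false_eq_true, if_false]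
        rw [hgpt f' hfe]
    · -- fresh frequency: a new singleton group is appended
      have hcont : (PySem.Dict.mk (pvGrp pred P)).contains e.2 = false := by
        rw [PySem.Dict.contains_eq_decide_mem_keys]
        rw [show (PySem.Dict.mk (pvGrp pred P)).keys = (pvGrp pred P).map Prod.fst from rfl,
          pv_grp_keys]
        simp only [decide_eq_false_iff_not, List.mem_filter]
        intro hc
        exact hmem ((PySem.List.mem_dedup _ _).mp hc.1)
      unfold pvStep
      rw [if_neg (by simp [hcont])]
      rw [show ∀ (d : PySem.Dict Int (PySem.Set String)),
            d.modify e.2 PySem.Set.empty (fun s => PySem.Set.add s e.1)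
              = d.insert e.2 (PySem.Set.add (d.getD e.2 PySem.Set.empty) e.1) from fun _ => rfl]
      have hit2 : ((PySem.Dict.mk (pvGrp pred P)).insert e.2 PySem.Set.empty).items
          = pvGrp pred P ++ [(e.2, PySem.Set.empty)] :=
        PySem.Dict.items_insert_of_not_contains _ _ hcont
      have hd2 : (PySem.Dict.mk (pvGrp pred P)).insert e.2 PySem.Set.empty
          = PySem.Dict.mk (pvGrp pred P ++ [(e.2, PySem.Set.empty)]) := PySem.Dict.ext hit2
      rw [hd2]
      have hnotin : e.2 ∉ (pvGrp pred P).map Prod.fst := by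
        rw [pv_grp_keys]
        intro hc
        exact hmem ((PySem.List.mem_dedup _ _).mp (List.mem_filter.mp hc).1)
      have hk2 : (PySem.Dict.mk (pvGrp pred P ++ [(e.2, PySem.Set.empty)])).keys
          = (pvGrp pred P).map Prod.fst ++ [e.2] := by simp [PySem.Dict.keys]
      have hnk2 : (PySem.Dict.mk (pvGrp pred P ++ [(e.2, PySem.Set.empty)])).keys.Nodup := by
        rw [hk2, List.nodup_append]
        refine ⟨by rw [pv_grp_keys]; exact (PySem.List.nodup_dedup _).filter _, List.nodup_singleton _, ?_⟩
        intro a ha b hb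
        simp only [List.mem_singleton] at hb
        subst hb
        exact fun h => hnotin (h ▸ ha)
      have hcont2 : (PySem.Dict.mk (pvGrp pred P ++ [(e.2, PySem.Set.empty)])).contains e.2 = true := by
        rw [PySem.Dict.contains_eq_decide_mem_keys, hk2]
        simp
      have hgetD2 : (PySem.Dict.mk (pvGrp pred P ++ [(e.2, PySem.Set.empty)])).getD e.2 PySem.Set.empty
          = PySem.Set.empty :=
        PySem.Dict.getD_of_mem_items _ (by simp) hnk2 _
      apply PySem.Dict.ext
      rw [PySem.Dict.items_insert_of_contains _ _ hcont2, hgetD2]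
      show (pvGrp pred P ++ [(e.2, PySem.Set.empty)]).map _ = _
      rw [List.map_append]
      have hrep : (pvGrp pred P).map
          (fun p => if (p.1 == e.2) = true then (e.2, PySem.Set.add PySem.Set.empty e.1) else p)
            = pvGrp pred P := by
        apply List.map_congr_left ?_ |>.trans (List.map_id _)
        intro q hq
        have : q.1 ≠ e.2 := fun h => hnotin (h ▸ List.mem_map_of_mem hq)
        simp [beq_eq_false_iff_ne.mpr this]
      rw [hrep]
      have hPfil : P.filter (fun q => q.2 == e.2) = [] := by
        apply List.filter_eq_nil_iff.mpr
        intro q hq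
        simp only [Bool.not_eq_true, beq_eq_false_iff_ne]
        exact fun h => hmem (h ▸ List.mem_map_of_mem hq)
      unfold pvGrp
      rw [hsnd, pv_dedup_append, if_neg hmem, List.filter_append]
      simp only [List.filter_cons, hp, List.filter_nil, if_true, List.map_append, List.map_cons,
        List.map_nil]
      congr 1
      · apply List.map_congr_left
        intro f' hf'
        have hfe : f' ≠ e.2 := by
          intro h
          exact hmem (h ▸ (PySem.List.mem_dedup _ _).mp (List.mem_filter.mp hf').1)
        rw [hgpt f' hfe]
      · have h1 : ((P ++ [e]).filter (fun q => q.2 == e.2)) = [e] := by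
          rw [List.filter_append, hPfil]; simp
        simp [h1]
  · -- pred e.2 is false: nothing changes
    rw [if_neg hp]
    apply PySem.Dict.ext
    show pvGrp pred P = _
    unfold pvGrp
    rw [hsnd, pv_dedup_append]
    by_cases hmem : e.2 ∈ P.map Prod.snd
    · rw [if_pos hmem]
      apply List.map_congr_left
      intro f' hf'
      have hfp : pred f' = true := (List.mem_filter.mp hf').2
      have hfe : f' ≠ e.2 := fun h => (by simp [h ▸ hfp] at hp)
      rw [hgpt f' hfe]
    · rw [if_neg hmem, List.filter_append]
      simp only [List.filter_cons, hp, Bool.false_eq_true, if_false, List.filter_nil, List.append_nil]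
      apply List.map_congr_left
      intro f' hf'
      have hfe : f' ≠ e.2 := by
        intro h
        exact hmem (h ▸ (PySem.List.mem_dedup _ _).mp (List.mem_filter.mp hf').1)
      rw [hgpt f' hfe]

lemma pvLoop (pred : Int → Bool) :
    ∀ (L P : List (String × Int)), ((P ++ L).map Prod.fst).Nodup →
      (L.foldl (fun t p => if pred p.2 then pvStep t p else t) (PySem.Dict.mk (pvGrp pred P))).items
        = pvGrp pred (P ++ L) := by
  intro L
  induction L with
  | nil => intro P _; simp
  | cons e L ih =>
    intro P h
    have hch : e.1 ∉ P.map Prod.fst := by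
      rw [List.map_append, List.nodup_append] at h
      intro hmem
      exact h.2.2 e.1 hmem e.1 (by simp) rfl
    rw [List.foldl_cons, pvStep_grp pred P e hch]
    have hre : P ++ e :: L = (P ++ [e]) ++ L := by simp
    rw [hre] at h ⊢
    exact ih (P ++ [e]) h

lemma pv_core (L : List (String × Int)) (hpos : ∀ q ∈ L, (1:Int) ≤ q.2) :
    (pvGrp (fun _ => true) L).filter
        (fun p => decide (2 ≤ PySem.Set.len p.2) && decide ((0:Int) < p.1))
      = pvGrp (fun f => decide (2 ≤ PySem.List.count (L.map Prod.snd) f)) L := by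
  unfold pvGrp
  rw [List.filter_true, List.filter_map]
  congr 1
  apply List.filter_congr
  intro f' hf'
  have hf'mem : f' ∈ L.map Prod.snd := (PySem.List.mem_dedup _ _).mp hf'
  have hfpos : (0:Int) < f' := by
    obtain ⟨q, hq, rfl⟩ := List.mem_map.mp hf'mem
    have := hpos q hq
    omega
  have hcnt : PySem.Set.len ((L.filter (fun q => q.2 == f')).map Prod.fst)
      = (PySem.List.count (L.map Prod.snd) f' : Int) := by
    rw [PySem.List.count_eq]
    show (((L.filter (fun q => q.2 == f')).map Prod.fst).length : Int) = ((L.map Prod.snd).count f' : Int)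
    rw [List.length_map, ← List.countP_eq_length_filter, List.count_eq_countP, List.countP_map]
    rfl
  simp only [Function.comp_apply, hcnt, hfpos, decide_true, Bool.and_true]
  rw [decide_eq_decide]
  omega

/-- A's grouped-and-filtered items are exactly the tied grouping. -/
lemma pvA_items (L : List (String × Int)) (M : PySem.Set String)
    (hnd : (L.map Prod.fst).Nodup) (hpos : ∀ q ∈ L, (1:Int) ≤ q.2) :
    ((if 2 ≤ PySem.Set.len M then
        (L.foldl
          (fun g p =>
            (if g.contains p.2 then g else g.insert p.2 PySem.Set.empty).modify p.2
              PySem.Set.empty (fun s => PySem.Set.add s p.1))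
          PySem.Dict.empty).insert 0 M
      else
        L.foldl
          (fun g p =>
            (if g.contains p.2 then g else g.insert p.2 PySem.Set.empty).modify p.2
              PySem.Set.empty (fun s => PySem.Set.add s p.1))
          PySem.Dict.empty).items.filter
      (fun p => decide (2 ≤ PySem.Set.len p.2) && decide ((0:Int) < p.1)))
      = pvGrp (fun f => decide (2 ≤ PySem.List.count (L.map Prod.snd) f)) L := by
  have hnd' : (([] ++ L).map Prod.fst).Nodup := by simpa using hnd
  have hA : (fun (g : PySem.Dict Int (PySem.Set String)) (p : String × Int) =>
        (if g.contains p.2 then g else g.insert p.2 PySem.Set.empty).modify p.2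
          PySem.Set.empty (fun s => PySem.Set.add s p.1))
      = (fun g p => if (fun _ : Int => true) p.2 then pvStep g p else g) := by
    funext g p
    simp [pvStep]
  have hGA : (L.foldl (fun g p => if (fun _ : Int => true) p.2 then pvStep g p else g)
      PySem.Dict.empty).items = pvGrp (fun _ => true) L := by
    have h0 := pvLoop (fun _ => true) L [] hnd'
    rw [show PySem.Dict.mk (pvGrp (fun _ => true) []) = (PySem.Dict.empty : PySem.Dict Int (PySem.Set String)) from rfl,
      List.nil_append] at h0
    exact h0
  rw [hA]
  by_cases hm : 2 ≤ PySem.Set.len M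
  · rw [if_pos hm]
    have hkeys : (L.foldl (fun g p => if (fun _ : Int => true) p.2 then pvStep g p else g)
        PySem.Dict.empty).items.map Prod.fst = PySem.List.dedup (L.map Prod.snd) := by
      rw [hGA, pv_grp_keys, List.filter_true]
    have hG0 : (L.foldl (fun g p => if (fun _ : Int => true) p.2 then pvStep g p else g)
        PySem.Dict.empty).contains 0 = false := by
      rw [PySem.Dict.contains_eq_decide_mem_keys]
      apply decide_eq_false
      intro hc
      rw [show (L.foldl (fun g p => if (fun _ : Int => true) p.2 then pvStep g p else g)
          PySem.Dict.empty).keys = (L.foldl (fun g p => if (fun _ : Int => true) p.2 then pvStep g p else g)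
          PySem.Dict.empty).items.map Prod.fst from rfl, hkeys] at hc
      obtain ⟨q, hq, hq0⟩ := List.mem_map.mp ((PySem.List.mem_dedup _ _).mp hc)
      have := hpos q hq
      omega
    rw [PySem.Dict.items_insert_of_not_contains _ _ hG0, hGA, List.filter_append]
    simp only [List.filter_cons, List.filter_nil, lt_self_iff_false,
      decide_false, Bool.and_false, Bool.false_eq_true, if_false, List.append_nil]
    exact pv_core L hpos
  · rw [if_neg hm, hGA]
    exact pv_core L hpos

/-- B's fold over distinct frequencies: inserting along fresh, pairwise-distinct keys appends. -/
lemma pvB_fold (pred : Int → Bool) (g : Int → PySem.Set String) :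
    ∀ (ks : List Int) (d : PySem.Dict Int (PySem.Set String)), ks.Nodup →
      (∀ f ∈ ks, d.contains f = false) →
      (ks.foldl (fun t f => if pred f then t.insert f (g f) else t) d).items
        = d.items ++ (ks.filter pred).map (fun f => (f, g f)) := by
  intro ks
  induction ks with
  | nil => intro d _ _; simp
  | cons k ks ih =>
    intro d hnd hfr
    have hk : d.contains k = false := hfr k (by simp)
    rw [List.foldl_cons]
    by_cases hp : pred k
    · rw [if_pos hp]
      have hfr' : ∀ f ∈ ks, (d.insert k (g k)).contains f = false := by
        intro f hf
        rw [PySem.Dict.contains_eq_decide_mem_keys, PySem.Dict.keys_insert_of_not_contains _ _ hk]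
        apply decide_eq_false
        simp only [List.mem_append, List.mem_singleton]
        rintro (h | h)
        · have := hfr f (by simp [hf])
          rw [PySem.Dict.contains_eq_decide_mem_keys] at this
          exact absurd h (of_decide_eq_false this)
        · exact (List.nodup_cons.mp hnd).1 (h ▸ hf)
      rw [ih (d.insert k (g k)) (List.nodup_cons.mp hnd).2 hfr',
        PySem.Dict.items_insert_of_not_contains _ _ hk]
      simp [hp]
    · rw [if_neg hp, ih d (List.nodup_cons.mp hnd).2 (fun f hf => hfr f (by simp [hf]))]
      simp [hp]

-- ===== VERDICT (by name: the statement is the Claim_ definition above) =====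
theorem count_frequency_ties_spec : Claim_equal_count_frequency_ties := by
  intro text _
  show count_frequency_ties text = count_frequency_ties_alt text
  set L : List (String × Int) := (PySem.Dict.counter
      (((PySem.Str.upper text).toList.filter (fun c => PySem.Chars.isalpha c)).map
        (fun c => String.ofList [c]))).items with hL
  have hnd : (L.map Prod.fst).Nodup := by
    rw [hL, PySem.Dict.items_counter, List.map_map]
    simp only [Function.comp_def, List.map_id_fun', id]
    exact PySem.Set.nodup_ofList _
  have hpos : ∀ q ∈ L, (1:Int) ≤ q.2 := by
    rw [hL, PySem.Dict.items_counter]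
    intro q hq
    obtain ⟨k, hk, rfl⟩ := List.mem_map.mp hq
    have : 0 < List.count k (((PySem.Str.upper text).toList.filter
        (fun c => PySem.Chars.isalpha c)).map (fun c => String.ofList [c])) :=
      List.count_pos_iff.mpr ((PySem.Set.mem_ofList _ _).mp hk)
    simp only []
    omega
  -- B's tied dict, rewritten through the fold lemma
  have hB : ((PySem.List.dedup (L.map Prod.snd)).foldl
      (fun t f =>
        if 2 ≤ PySem.List.count (L.map Prod.snd) f then
          t.insert f (PySem.Set.ofList ((L.filter (fun q => q.2 == f)).map Prod.fst))
        else t)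
      PySem.Dict.empty).items
        = pvGrp (fun f => decide (2 ≤ PySem.List.count (L.map Prod.snd) f)) L := by
    have hfold := pvB_fold (fun f => decide (2 ≤ PySem.List.count (L.map Prod.snd) f))
      (fun f => PySem.Set.ofList ((L.filter (fun q => q.2 == f)).map Prod.fst))
      (PySem.List.dedup (L.map Prod.snd)) PySem.Dict.empty
      (PySem.List.nodup_dedup _) (fun f _ => rfl)
    simp only [decide_eq_true_eq] at hfold
    rw [hfold,
      show (PySem.Dict.empty : PySem.Dict Int (PySem.Set String)).items = [] from rfl,
      List.nil_append]
    unfold pvGrp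
    apply List.map_congr_left
    intro f hf
    have hsub : ((L.filter (fun q => q.2 == f)).map Prod.fst).Nodup :=
      ((List.filter_sublist).map Prod.fst).nodup hnd
    rw [PySem.Set.ofList_eq_self_of_nodup _ hsub]
  have hdicts : ∀ M : PySem.Set String, PySem.Dict.mk
      ((if 2 ≤ PySem.Set.len M then
        (L.foldl
          (fun g p =>
            (if g.contains p.2 then g else g.insert p.2 PySem.Set.empty).modify p.2
              PySem.Set.empty (fun s => PySem.Set.add s p.1))
          PySem.Dict.empty).insert 0 M
      else
        L.foldl
          (fun g p =>
            (if g.contains p.2 then g else g.insert p.2 PySem.Set.empty).modify p.2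
              PySem.Set.empty (fun s => PySem.Set.add s p.1))
          PySem.Dict.empty).items.filter
        (fun p => decide (2 ≤ PySem.Set.len p.2) && decide ((0:Int) < p.1)))
      = (PySem.List.dedup (L.map Prod.snd)).foldl
          (fun t f =>
            if 2 ≤ PySem.List.count (L.map Prod.snd) f then
              t.insert f (PySem.Set.ofList ((L.filter (fun q => q.2 == f)).map Prod.fst))
            else t)
          PySem.Dict.empty := by
    intro M
    apply PySem.Dict.ext
    rw [hB]
    exact pvA_items L M hnd hpos
  exact congrArg
    (fun t : PySem.Dict Int (PySem.Set String) =>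
      ((t.size : Int), PySem.List.maxD (t.values.map PySem.Set.len) (fun x => x) 0,
        (t.values.map PySem.Set.len).sum, t.items))
    (hdicts _)
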